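-- pv_equiv track=rewrite | github.com/Gillingham-Lab/deliqc | deliqc/dna/codons.py | get_codon_coordinates
-- ===== SOURCE A (Python) =====
-- from typing import List, Tuple
--
-- def get_codon_coordinates(dna) -> List[Tuple[int, int]]:
--     """
--     Returns a list of codon coordinates containing the start and the end of a codon.
--     :param dna:
--     :return:
--     """
--     coordinates = []
--
--     in_codon = False
--     start = None
--     length = None
--
--     for i in range(len(dna)):
--         if in_codon is False:
--             if dna[i] == "N":
--                 in_codon = True
--                 start = i
--         else:
--             if dna[i] != "N":
--                 coordinates.append((start, i))
--                 in_codon = False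
--                 start = None
--
--     return coordinates
-- ===== SOURCE B (Python) =====
-- from itertools import groupby
-- from typing import List, Tuple
--
-- def get_codon_coordinates(dna) -> List[Tuple[int, int]]:
--     """Run-length pass with itertools.groupby: each maximal group of 'N'
--     that is not the final group of the string yields (start, end)."""
--     coordinates = []
--     groups = [(ch, len(list(g))) for ch, g in groupby(dna)]
--     pos = 0
--     for idx, (ch, n) in enumerate(groups):
--         if ch == "N" and idx < len(groups) - 1:
--             coordinates.append((pos, pos + n))
--         pos += n
--     return coordinates
-- ===== Notes on version B (the rewrite author's own statement) =====
-- stated objective: idiomatic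
-- what changed: Replaced the manual in_codon/start state machine over character indices with an itertools.groupby run-length pass that emits (pos, pos+n) for every maximal 'N' group except the final group (reproducing A's dropping of a trailing N-run).
import Mathlib
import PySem

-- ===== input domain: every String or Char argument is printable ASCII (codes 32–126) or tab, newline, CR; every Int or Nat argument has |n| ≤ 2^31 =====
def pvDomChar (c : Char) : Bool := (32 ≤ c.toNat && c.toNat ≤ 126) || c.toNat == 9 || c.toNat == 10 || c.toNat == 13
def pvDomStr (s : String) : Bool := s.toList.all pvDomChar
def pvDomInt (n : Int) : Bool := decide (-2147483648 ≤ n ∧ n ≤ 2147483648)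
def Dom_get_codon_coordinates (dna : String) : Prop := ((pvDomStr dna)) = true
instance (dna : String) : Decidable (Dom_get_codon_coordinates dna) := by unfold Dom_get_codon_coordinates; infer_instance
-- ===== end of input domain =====

-- B replaces A's in_codon/start index state machine with a groupby run-length pass (idiomatic, same cost).


-- ===== PORT A =====
-- literal port of A: for i in range(len(dna)) with state (coordinates, in_codon, start).
-- dna[i] is always in range here, so it is ported as pyGetD with a dummy default;
-- 'start' is Option Int (None), read with .getD 0 at the (always some) append site.
def get_codon_coordinates (dna : String) : List (Int × Int) :=
  let cs := dna.toList
  (((PySem.List.pyRange 0 cs.length 1).foldl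
      (fun (st : List (Int × Int) × Bool × Option Int) i =>
        let (coordinates, in_codon, start) := st
        if in_codon = false then
          if PySem.List.pyGetD cs i ' ' == 'N' then (coordinates, true, some i)
          else (coordinates, in_codon, start)
        else
          if PySem.List.pyGetD cs i ' ' != 'N' then
            (coordinates ++ [(start.getD 0, i)], false, (none : Option Int))
          else (coordinates, in_codon, start))
      ([], false, none))).1

-- ===== PORT B =====
-- itertools.groupby, ported as a left-to-right run-length scan.
def pvGo (c : Char) (n : Nat) : List Char → List (Char × Nat)
  | [] => [(c, n)]
  | d :: cs => if d = c then pvGo c (n + 1) cs else (c, n) :: pvGo d 1 cs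

def pvRle : List Char → List (Char × Nat)
  | [] => []
  | c :: cs => pvGo c 1 cs

def get_codon_coordinates_alt (dna : String) : List (Int × Int) :=
  let groups := pvRle dna.toList
  (((PySem.List.enumerate groups 0).foldl
      (fun (st : List (Int × Int) × Int) p =>
        let (coordinates, pos) := st
        let (idx, ch, n) := p
        (if ch = 'N' ∧ idx < (groups.length : Int) - 1 then
           coordinates ++ [(pos, pos + (n : Int))]
         else coordinates,
         pos + (n : Int)))
      ([], 0))).1

-- ===== PRECONDITION & SPEC =====
def Spec_get_codon_coordinates (dna : String) (out : List (Int × Int)) : Prop := out = get_codon_coordinates_alt dna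
instance (dna : String) (out : List (Int × Int)) : Decidable (Spec_get_codon_coordinates dna out) := by unfold Spec_get_codon_coordinates; infer_instance

-- ===== CLAIM (what is proved, stated in full; the proofs are below) =====
def Claim_equal_get_codon_coordinates : Prop := ∀ (dna : String), Dom_get_codon_coordinates dna → Spec_get_codon_coordinates dna (get_codon_coordinates dna)

-- ===== LEMMAS AND PROOFS =====

-- common reference function: scan the characters with the start of the current
-- N-run (if inside one) as state; emit (start, i) when a run ends at a non-N char.
def pvSpec (i : Int) : List Char → Option Int → List (Int × Int)
  | [], _ => []
  | c :: cs, none => if c = 'N' then pvSpec (i+1) cs (some i) else pvSpec (i+1) cs none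
  | c :: cs, some s => if c = 'N' then pvSpec (i+1) cs (some s) else (s, i) :: pvSpec (i+1) cs none

-- A's step function, named so the induction hypothesis applies after one unfolding
def pvStepA (st : List (Int × Int) × Bool × Option Int) (p : Int × Char) :
    List (Int × Int) × Bool × Option Int :=
  let (coordinates, in_codon, start) := st
  if in_codon = false then
    if p.2 == 'N' then (coordinates, true, some p.1)
    else (coordinates, in_codon, start)
  else
    if p.2 != 'N' then
      (coordinates ++ [(start.getD 0, p.1)], false, (none : Option Int))
    else (coordinates, in_codon, start)

-- A's fold over enumerate equals pvSpec
theorem keyA (cs : List Char) : ∀ (s : Int) (acc : List (Int × Int)) (b : Bool) (o : Option Int),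
    (((PySem.List.enumerate cs s).foldl pvStepA (acc, b, o))).1
    = acc ++ pvSpec s cs (if b then some (o.getD 0) else none) := by
  induction cs with
  | nil => intro s acc b o; simp [PySem.List.enumerate_nil, pvSpec]
  | cons c cs ih =>
    intro s acc b o
    rw [PySem.List.enumerate_cons, List.foldl_cons]
    cases b with
    | false =>
      by_cases hc : c = 'N' <;> simp only [pvStepA, hc, if_true] <;>
        simp [pvSpec, ih, hc]
    | true =>
      by_cases hc : c = 'N' <;> simp only [pvStepA, hc, if_true] <;>
        simp [pvSpec, ih, hc]

-- B-side recursive form of the group fold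
def pvBRec (pos : Int) : List (Char × Nat) → List (Int × Int)
  | [] => []
  | (c, n) :: rest =>
    if rest ≠ [] ∧ c = 'N' then (pos, pos + (n : Int)) :: pvBRec (pos + n) rest
    else pvBRec (pos + n) rest

theorem pvGo_ne_nil (rest : List Char) (c : Char) (n : Nat) : pvGo c n rest ≠ [] := by
  induction rest generalizing c n with
  | nil => simp [pvGo]
  | cons d cs ih => simp only [pvGo]; split_ifs <;> simp [ih]

-- B's step function, parametrised by the total group-list length L
def pvStepB (L : Int) (st : List (Int × Int) × Int) (p : Int × Char × Nat) :
    List (Int × Int) × Int :=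
  (if p.2.1 = 'N' ∧ p.1 < L - 1 then st.1 ++ [(st.2, st.2 + (p.2.2 : Int))] else st.1,
   st.2 + (p.2.2 : Int))

theorem keyB_fold (gs : List (Char × Nat)) : ∀ (s pos : Int) (acc : List (Int × Int)) (L : Int),
    s + gs.length = L →
    (((PySem.List.enumerate gs s).foldl (pvStepB L) (acc, pos))).1
    = acc ++ pvBRec pos gs := by
  induction gs with
  | nil => intro s pos acc L h; simp [PySem.List.enumerate_nil, pvBRec]
  | cons g gs ih =>
    intro s pos acc L h
    obtain ⟨c, n⟩ := g
    rw [PySem.List.enumerate_cons, List.foldl_cons]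
    have hlen : s < L - 1 ↔ gs ≠ [] := by
      rcases gs with _ | ⟨g', gs'⟩ <;> simp at h ⊢ <;> omega
    by_cases hc : c = 'N'
    · by_cases hg : gs = []
      · subst hg
        simp only [pvStepB, pvBRec]
        simp [PySem.List.enumerate_nil, hc, hlen]
      · simp only [pvStepB, pvBRec]
        rw [if_pos ⟨hc, hlen.mpr hg⟩, ih (s+1) _ _ L (by simp at h ⊢; omega)]
        simp [hg, hc]
    · simp only [pvStepB, pvBRec]
      rw [if_neg (by simp [hc]), ih (s+1) _ _ L (by simp at h ⊢; omega)]
      simp [hc]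

theorem keyGo (rest : List Char) : ∀ (c : Char) (n : Nat) (pos0 : Int),
    pvBRec pos0 (pvGo c n rest)
    = if c = 'N' then pvSpec (pos0 + n) rest (some pos0) else pvSpec (pos0 + n) rest none := by
  induction rest with
  | nil => intro c n pos0; by_cases hc : c = 'N' <;> simp [pvGo, pvBRec, pvSpec, hc]
  | cons d cs ih =>
    intro c n pos0
    simp only [pvGo]
    by_cases hd : d = c
    · rw [if_pos hd, ih]
      subst hd
      by_cases hc : d = 'N' <;>
        simp [pvSpec, hc, Nat.cast_add, Nat.cast_one, add_assoc]
    · rw [if_neg hd]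
      have hne := pvGo_ne_nil cs d 1
      by_cases hc : c = 'N'
      · rw [pvBRec, if_pos ⟨hne, hc⟩, ih]
        have hdN : d ≠ 'N' := fun h => hd (h.trans hc.symm)
        simp [pvSpec, hc, hdN, Nat.cast_one, add_assoc]
      · rw [pvBRec, if_neg (by simp [hc]), ih]
        by_cases hdN : d = 'N' <;>
          simp [pvSpec, hc, hdN, Nat.cast_one, add_assoc]

-- ===== VERDICT (by name: the statement is the Claim_ definition above) =====
theorem portA_eq_spec (dna : String) :
    get_codon_coordinates dna = pvSpec 0 dna.toList none := by
  have h : get_codon_coordinates dna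
      = ((PySem.List.enumerate dna.toList 0).foldl pvStepA ([], false, none)).1 := by
    rw [PySem.List.enumerate_eq_map_pyRange (d := ' '), List.foldl_map]
    rfl
  rw [h, keyA]
  simp

theorem portB_eq_spec (dna : String) :
    get_codon_coordinates_alt dna = pvSpec 0 dna.toList none := by
  have h : get_codon_coordinates_alt dna
      = ((PySem.List.enumerate (pvRle dna.toList) 0).foldl
          (pvStepB ((pvRle dna.toList).length : Int)) ([], 0)).1 := rfl
  rw [h, keyB_fold _ 0 0 [] _ (by simp)]
  rcases hcs : dna.toList with _ | ⟨c, cs⟩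
  · simp [pvRle, pvBRec, pvSpec]
  · rw [pvRle, keyGo]
    by_cases hc : c = 'N' <;> simp [pvSpec, hc]

theorem get_codon_coordinates_spec : Claim_equal_get_codon_coordinates := by
  intro dna _
  show get_codon_coordinates dna = get_codon_coordinates_alt dna
  rw [portA_eq_spec, portB_eq_spec]
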